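-- pv_equiv track=rewrite | github.com/michaelayoade/dotmac_erp | scripts/fix_table_container.py | fix_overflow_to_container
-- ===== SOURCE A (Python) =====
-- def fix_overflow_to_container(content: str) -> tuple[str, int]:
--     """Replace <div class="overflow-x-auto"> with <div class="table-container">
--     when followed by a <table> tag within the next few lines."""
--     fixes = 0
--     lines = content.split("\n")
--     i = 0
--     while i < len(lines):
--         line = lines[i]
--         stripped = line.strip()
--
--         # Pattern: <div class="overflow-x-auto"> followed by <table
--         if (
--             'class="overflow-x-auto"' in stripped
--             or "class='overflow-x-auto'" in stripped
--         ):
--             # Check next 3 lines for a <table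
--             has_table = False
--             for j in range(i, min(i + 4, len(lines))):
--                 if "<table" in lines[j]:
--                     has_table = True
--                     break
--             if has_table:
--                 lines[i] = line.replace("overflow-x-auto", "table-container")
--                 fixes += 1
--
--         i += 1
--
--     return "\n".join(lines), fixes
-- ===== SOURCE B (Python) =====
-- def fix_overflow_to_container(content: str) -> tuple[str, int]:
--     """Replace <div class="overflow-x-auto"> with <div class="table-container">
--     when followed by a <table> tag within the next few lines.
--
--     Reverse pass computes, for every line, the distance to the nearest
--     following (or same) line containing '<table'; a single forward pass then
--     rewrites exactly the lines whose distance is at most 3."""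
--     lines = content.split("\n")
--     dist = []
--     d = None
--     for line in reversed(lines):
--         if "<table" in line:
--             d = 0
--         elif d is not None:
--             d += 1
--         dist.append(d)
--     dist.reverse()
--     out = []
--     fixes = 0
--     for line, d in zip(lines, dist):
--         s = line.strip()
--         if ('class="overflow-x-auto"' in s or "class='overflow-x-auto'" in s) and d is not None and d <= 3:
--             out.append(line.replace("overflow-x-auto", "table-container"))
--             fixes += 1
--         else:
--             out.append(line)
--     return "\n".join(out), fixes
-- ===== Notes on version B (the rewrite author's own statement) =====
-- stated objective: alternative
-- what changed: Replaced the per-match forward rescan of the next 3 lines with a reverse pass that precomputes each line's distance to the next table-opening line, followed by a single forward pass that rewrites the lines whose distance is at most 3; the output list is built fresh instead of mutating the line array in place.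
import Mathlib
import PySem

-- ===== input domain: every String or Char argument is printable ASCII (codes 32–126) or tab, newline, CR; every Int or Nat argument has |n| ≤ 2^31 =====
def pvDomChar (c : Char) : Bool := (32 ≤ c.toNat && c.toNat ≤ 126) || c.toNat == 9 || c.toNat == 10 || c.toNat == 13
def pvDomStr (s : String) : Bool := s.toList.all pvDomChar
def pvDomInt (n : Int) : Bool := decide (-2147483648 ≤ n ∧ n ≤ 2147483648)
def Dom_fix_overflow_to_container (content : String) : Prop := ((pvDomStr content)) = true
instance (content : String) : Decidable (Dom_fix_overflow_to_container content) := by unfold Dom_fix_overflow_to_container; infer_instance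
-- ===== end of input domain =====

-- B replaces A's per-match rescan of the next 3 lines by a reverse pass precomputing
-- each line's distance to the next '<table' line plus one forward pass (objective: alternative).

-- string literals shared by both ports (lines are handled as List Char, per PySem.Chars)
def pvTbl : List Char := "<table".toList
def pvC1 : List Char := "class=\"overflow-x-auto\"".toList
def pvC2 : List Char := "class='overflow-x-auto'".toList
def pvOld : List Char := "overflow-x-auto".toList
def pvNew : List Char := "table-container".toList

-- ===== PORT A =====
-- inner 'for j in range(i, min(i + 4, len(lines))): if "<table" in lines[j]: break' loop
def pvHasTbl (lines : List (List Char)) (i : Nat) : Bool :=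
  (List.range 4).any (fun d => ((lines[i + d]?).map (fun l => PySem.Chars.isIn pvTbl l)).getD false)

-- the 'while i < len(lines)' loop, mutating the line list via set
def pvLoopA (lines : List (List Char)) (i : Nat) (fixes : Int) : List (List Char) × Int :=
  if h : i < lines.length then
    let line := lines[i]
    let stripped := PySem.Chars.strip line
    if PySem.Chars.isIn pvC1 stripped || PySem.Chars.isIn pvC2 stripped then
      if pvHasTbl lines i then
        pvLoopA (lines.set i (PySem.Chars.replace line pvOld pvNew)) (i + 1) (fixes + 1)
      else
        pvLoopA lines (i + 1) fixes
    else
      pvLoopA lines (i + 1) fixes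
  else
    (lines, fixes)
termination_by lines.length - i
decreasing_by
  · simp only [List.length_set]; omega
  · omega
  · omega

def fix_overflow_to_container (content : String) : String × Int :=
  let lines := PySem.Chars.splitOn content.toList "\n".toList
  let r := pvLoopA lines 0 0
  (String.ofList (PySem.Chars.join "\n".toList r.1), r.2)

-- ===== PORT B =====
-- the reversed pass: pairs each line with the running distance d (Option Nat) to the
-- next line containing '<table'; .2 is the value of d after processing the list
def pvAnnotate : List (List Char) → List (List Char × Option Nat) × Option Nat
  | [] => ([], none)
  | l :: rest =>
    let p := pvAnnotate rest
    let d' := if PySem.Chars.isIn pvTbl l then some 0 else Option.map (· + 1) p.2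
    ((l, d') :: p.1, d')

-- the forward 'for line, d in zip(lines, dist)' loop with out.append and the fixes counter
def pvStepB (st : List (List Char) × Int) (p : List Char × Option Nat) : List (List Char) × Int :=
  let s := PySem.Chars.strip p.1
  if (PySem.Chars.isIn pvC1 s || PySem.Chars.isIn pvC2 s)
      && (match p.2 with | some k => decide (k ≤ 3) | none => false) then
    (st.1 ++ [PySem.Chars.replace p.1 pvOld pvNew], st.2 + 1)
  else
    (st.1 ++ [p.1], st.2)

def fix_overflow_to_container_alt (content : String) : String × Int :=
  let lines := PySem.Chars.splitOn content.toList "\n".toList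
  let pairs := (pvAnnotate lines).1
  let r := pairs.foldl pvStepB ([], 0)
  (String.ofList (PySem.Chars.join "\n".toList r.1), r.2)

-- ===== PRECONDITION & SPEC =====
def Spec_fix_overflow_to_container (content : String) (out : String × Int) : Prop := out = fix_overflow_to_container_alt content
instance (content : String) (out : String × Int) : Decidable (Spec_fix_overflow_to_container content out) := by unfold Spec_fix_overflow_to_container; infer_instance

-- ===== CLAIM (what is proved, stated in full; the proofs are below) =====
def Claim_equal_fix_overflow_to_container : Prop := ∀ (content : String), Dom_fix_overflow_to_container content → Spec_fix_overflow_to_container content (fix_overflow_to_container content)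

-- ===== LEMMAS AND PROOFS =====

-- reference description: how one suffix of the line list is processed
def pvProc : List (List Char) → List (List Char) × Int
  | [] => ([], 0)
  | l :: rest =>
    let c := (PySem.Chars.isIn pvC1 (PySem.Chars.strip l)
                || PySem.Chars.isIn pvC2 (PySem.Chars.strip l))
             && ((l :: rest).take 4).any (fun x => PySem.Chars.isIn pvTbl x)
    let t := pvProc rest
    ((if c then PySem.Chars.replace l pvOld pvNew else l) :: t.1,
     (if c then 1 else 0) + t.2)

lemma pvAnnotate_dist_le (xs : List (List Char)) (n : Nat) :
    (match (pvAnnotate xs).2 with | some k => decide (k ≤ n) | none => false)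
      = (xs.take (n + 1)).any (fun x => PySem.Chars.isIn pvTbl x) := by
  induction xs generalizing n with
  | nil => simp [pvAnnotate]
  | cons l rest ih =>
    by_cases h : PySem.Chars.isIn pvTbl l = true
    · simp [pvAnnotate, h]
    · cases n with
      | zero =>
        cases hd : (pvAnnotate rest).2 <;> simp [pvAnnotate, h, hd]
      | succ m =>
        have hm := ih m
        cases hd : (pvAnnotate rest).2 with
        | none =>
          rw [hd] at hm
          simp only [pvAnnotate, h, if_false, Bool.false_eq_true, hd, Option.map_none]
          simp only at hm
          simp [h, ← hm]
        | some k =>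
          rw [hd] at hm
          simp only [pvAnnotate, h, if_false, Bool.false_eq_true, hd, Option.map_some]
          simp only at hm
          have : (decide (k + 1 ≤ m + 1)) = decide (k ≤ m) := by simp
          simp only [List.take_succ_cons, List.any_cons, h, Bool.false_or, this, hm]

lemma pvHasTbl_eq (pre xs : List (List Char)) :
    pvHasTbl (pre ++ xs) pre.length = (xs.take 4).any (fun x => PySem.Chars.isIn pvTbl x) := by
  have hget : ∀ d : Nat, (pre ++ xs)[pre.length + d]? = xs[d]? := by
    intro d
    rw [List.getElem?_append_right (by omega)]
    congr 1
    omega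
  unfold pvHasTbl
  have hr : List.range 4 = [0, 1, 2, 3] := by decide
  rw [hr]
  simp only [List.any_cons, List.any_nil, hget]
  match xs with
  | [] => simp
  | [a] => simp
  | [a, b] => simp
  | [a, b, c] => simp
  | a :: b :: c :: d :: rest => simp

lemma pvLoopA_eq (xs pre : List (List Char)) (fixes : Int) :
    pvLoopA (pre ++ xs) pre.length fixes = (pre ++ (pvProc xs).1, fixes + (pvProc xs).2) := by
  induction xs generalizing pre fixes with
  | nil =>
    rw [pvLoopA]
    simp [pvProc]
  | cons l rest ih =>
    rw [pvLoopA]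
    have hlen : pre.length < (pre ++ l :: rest).length := by simp
    have hget : (pre ++ l :: rest)[pre.length]'hlen = l := by
      simp
    have hset : (pre ++ l :: rest).set pre.length (PySem.Chars.replace l pvOld pvNew)
        = (pre ++ [PySem.Chars.replace l pvOld pvNew]) ++ rest := by
      rw [List.set_append_right _ _ (Nat.le_refl _)]
      simp
    have hht := pvHasTbl_eq pre (l :: rest)
    simp only [hlen, dif_pos, hget]
    by_cases hc : (PySem.Chars.isIn pvC1 (PySem.Chars.strip l)
        || PySem.Chars.isIn pvC2 (PySem.Chars.strip l)) = true
    · simp only [hc, if_pos]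
      by_cases ht : pvHasTbl (pre ++ l :: rest) pre.length = true
      · simp only [ht, if_pos, hset]
        have h1 : pre.length + 1 = (pre ++ [PySem.Chars.replace l pvOld pvNew]).length := by simp
        rw [h1, ih]
        have hcc : ((PySem.Chars.isIn pvC1 (PySem.Chars.strip l)
                || PySem.Chars.isIn pvC2 (PySem.Chars.strip l))
             && ((l :: rest).take 4).any (fun x => PySem.Chars.isIn pvTbl x)) = true := by
          rw [← hht]; simp [hc, ht]
        simp only [pvProc, hcc, if_pos]
        refine Prod.ext ?_ ?_
        · simp
        · simp only; omega
      · simp only [ht, Bool.false_eq_true, if_neg, not_false_iff]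
        have h1 : pre.length + 1 = (pre ++ [l]).length := by simp
        have h2 : pre ++ l :: rest = (pre ++ [l]) ++ rest := by simp
        rw [h2, h1, ih]
        have hcc : ((PySem.Chars.isIn pvC1 (PySem.Chars.strip l)
                || PySem.Chars.isIn pvC2 (PySem.Chars.strip l))
             && ((l :: rest).take 4).any (fun x => PySem.Chars.isIn pvTbl x)) = false := by
          rw [← hht]
          simp only [Bool.and_eq_false_iff]
          right
          simpa using ht
        simp only [pvProc, hcc, Bool.false_eq_true, if_neg, not_false_iff]
        refine Prod.ext ?_ ?_
        · simp
        · simp only; omega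
    · simp only [hc, Bool.false_eq_true, if_neg, not_false_iff]
      have h1 : pre.length + 1 = (pre ++ [l]).length := by simp
      have h2 : pre ++ l :: rest = (pre ++ [l]) ++ rest := by simp
      rw [h2, h1, ih]
      have hcc : ((PySem.Chars.isIn pvC1 (PySem.Chars.strip l)
              || PySem.Chars.isIn pvC2 (PySem.Chars.strip l))
           && ((l :: rest).take 4).any (fun x => PySem.Chars.isIn pvTbl x)) = false := by
        simp only [Bool.and_eq_false_iff]
        left
        simpa using hc
      simp only [pvProc, hcc, Bool.false_eq_true, if_neg, not_false_iff]
      refine Prod.ext ?_ ?_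
      · simp
      · simp only; omega

lemma pvFoldB_eq (xs : List (List Char)) (acc : List (List Char)) (f : Int) :
    (pvAnnotate xs).1.foldl pvStepB (acc, f) = (acc ++ (pvProc xs).1, f + (pvProc xs).2) := by
  induction xs generalizing acc f with
  | nil => simp [pvAnnotate, pvProc]
  | cons l rest ih =>
    have hd : (pvAnnotate (l :: rest)).2
        = (if PySem.Chars.isIn pvTbl l then some 0 else Option.map (· + 1) (pvAnnotate rest).2) := by
      simp [pvAnnotate]
    have hcond : (match (pvAnnotate (l :: rest)).2 with | some k => decide (k ≤ 3) | none => false)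
        = ((l :: rest).take 4).any (fun x => PySem.Chars.isIn pvTbl x) :=
      pvAnnotate_dist_le (l :: rest) 3
    rw [hd] at hcond
    simp only [pvAnnotate, List.foldl_cons]
    by_cases hc : ((PySem.Chars.isIn pvC1 (PySem.Chars.strip l)
        || PySem.Chars.isIn pvC2 (PySem.Chars.strip l))
        && ((l :: rest).take 4).any (fun x => PySem.Chars.isIn pvTbl x)) = true
    · have hb : pvStepB (acc, f)
          (l, if PySem.Chars.isIn pvTbl l then some 0 else Option.map (· + 1) (pvAnnotate rest).2)
          = (acc ++ [PySem.Chars.replace l pvOld pvNew], f + 1) := by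
        unfold pvStepB
        rw [if_pos (by rw [hcond]; exact hc)]
      rw [hb, ih]
      simp only [pvProc, hc, if_pos]
      refine Prod.ext ?_ ?_
      · simp
      · simp only; omega
    · have hc' := Bool.eq_false_iff.mpr hc
      have hb : pvStepB (acc, f)
          (l, if PySem.Chars.isIn pvTbl l then some 0 else Option.map (· + 1) (pvAnnotate rest).2)
          = (acc ++ [l], f) := by
        unfold pvStepB
        rw [if_neg (by rw [hcond]; exact hc)]
      rw [hb, ih]
      simp only [pvProc, hc', Bool.false_eq_true, if_neg, not_false_iff]
      refine Prod.ext ?_ ?_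
      · simp
      · simp only; omega

-- ===== VERDICT (by name: the statement is the Claim_ definition above) =====
theorem fix_overflow_to_container_spec : Claim_equal_fix_overflow_to_container := by
  intro content _
  unfold Spec_fix_overflow_to_container fix_overflow_to_container fix_overflow_to_container_alt
  have hA := pvLoopA_eq (PySem.Chars.splitOn content.toList "\n".toList) [] 0
  have hB := pvFoldB_eq (PySem.Chars.splitOn content.toList "\n".toList) [] 0
  simp only [List.nil_append, List.length_nil] at hA hB
  simp only [hA, hB]
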